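-- pv_equiv track=rewrite | github.com/UtkarshPathrabe/Competitive-Coding | HackerRank Solutions/Data Structures/Trie/Contacts.py | contacts
-- ===== SOURCE A (Python) =====
-- def contacts(queries):
--     contactMap = dict()
--     result = list()
--     for query in queries:
--         if query[0] == 'add':
--             for i in range(1, len(query[1]) + 1):
--                 subString = query[1][:i]
--                 if subString in contactMap:
--                     contactMap[subString] += 1
--                 else:
--                     contactMap[subString] = 1
--         else:
--             if query[1] in contactMap:
--                 result.append(contactMap[query[1]])
--             else:
--                 result.append(0)
--     return result
-- ===== SOURCE B (Python) =====
-- def contacts(queries):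
--     # Lazy alternative: keep the list of added names; a 'find' counts
--     # names starting with the queried (nonempty) prefix on demand.
--     names = []
--     result = []
--     for query in queries:
--         if query[0] == 'add':
--             names.append(query[1])
--         else:
--             p = query[1]
--             result.append(sum(1 for w in names if w.startswith(p)))
--     return result
-- ===== Notes on version B (the rewrite author's own statement) =====
-- stated objective: alternative
-- what changed: B drops the prefix-count dictionary entirely: adds are O(1) appends to a plain list of names, and each find scans that list counting names that start with the queried prefix, instead of A's O(L^2) insertion of every prefix key per add.
-- outside the precondition, e.g. on contacts([['add', 'a'], ['find', '']]): A returns [0], B returns [1]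
import Mathlib
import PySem

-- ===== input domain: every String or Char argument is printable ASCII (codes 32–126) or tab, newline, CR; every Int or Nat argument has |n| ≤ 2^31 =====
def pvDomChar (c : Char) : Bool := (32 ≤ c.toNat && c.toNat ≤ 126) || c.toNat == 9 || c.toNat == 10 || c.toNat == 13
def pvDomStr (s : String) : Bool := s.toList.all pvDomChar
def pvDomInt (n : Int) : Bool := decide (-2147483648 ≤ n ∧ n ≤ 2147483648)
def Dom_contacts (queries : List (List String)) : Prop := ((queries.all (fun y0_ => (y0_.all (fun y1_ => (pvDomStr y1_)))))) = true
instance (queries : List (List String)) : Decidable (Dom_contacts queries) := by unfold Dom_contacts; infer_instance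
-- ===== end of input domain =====

-- B replaces A's prefix-count dictionary by a plain list of the added names, scanned at each find (alternative decomposition, not claimed faster).

-- ===== PORT A =====
-- one iteration of A's inner 'for i in range(1, len(query[1]) + 1)' loop
def contactsStep (w : String) (d : PySem.Dict String Int) (i : Int) : PySem.Dict String Int :=
  let sub := PySem.Str.slice w none (some i)
  if d.contains sub then d.insert sub (d.getD sub 0 + 1) else d.insert sub 1

-- A's whole inner loop for one 'add' query
def contactsAdd (w : String) (d : PySem.Dict String Int) : PySem.Dict String Int :=
  (PySem.List.pyRange 1 (PySem.Str.len w + 1) 1).foldl (contactsStep w) d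

-- body of A's 'for query in queries' loop
def contactsStepA (st : PySem.Dict String Int × List Int) (q : List String) :
    PySem.Dict String Int × List Int :=
  if PySem.List.pyGetD q 0 "" = "add" then
    (contactsAdd (PySem.List.pyGetD q 1 "") st.1, st.2)
  else
    let p := PySem.List.pyGetD q 1 ""
    (st.1, st.2 ++ [if st.1.contains p then st.1.getD p 0 else 0])

def contacts (queries : List (List String)) : List Int :=
  (queries.foldl contactsStepA (PySem.Dict.empty, [])).2

-- ===== PORT B =====
-- body of B's loop: state = (names added so far, results so far)
def contactsStepB (st : List String × List Int) (q : List String) : List String × List Int :=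
  if PySem.List.pyGetD q 0 "" = "add" then
    (st.1 ++ [PySem.List.pyGetD q 1 ""], st.2)
  else
    (st.1, st.2 ++ [((st.1.countP (fun w => PySem.Str.startswith w (PySem.List.pyGetD q 1 "")) : Nat) : Int)])

def contacts_alt (queries : List (List String)) : List Int :=
  (queries.foldl contactsStepB ([], [])).2

-- ===== PRECONDITION & SPEC =====
-- Pre_ excludes queries shorter than two entries, on which A raises IndexError, and non-'add' queries
-- carrying the empty string, a corner nobody specifies: A answers 0 there (it never stores the empty
-- prefix) while B counts every contact added so far — both defensible.
def Pre_contacts (queries : List (List String)) : Prop :=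
  ∀ q ∈ queries, 2 ≤ q.length ∧
    (PySem.List.pyGetD q 0 "" = "add" ∨ PySem.List.pyGetD q 1 "" ≠ "")
instance (queries : List (List String)) : Decidable (Pre_contacts queries) := by unfold Pre_contacts; infer_instance
def pvWitness_contacts : List (List String) := [["add", "abc"], ["add", "ab"], ["find", "a"], ["find", "b"]]
def Spec_contacts (queries : List (List String)) (out : List Int) : Prop := out = contacts_alt queries
instance (queries : List (List String)) (out : List Int) : Decidable (Spec_contacts queries out) := by unfold Spec_contacts; infer_instance

-- ===== CLAIM (what is proved, stated in full; the proofs are below) =====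
def Claim_equal_contacts : Prop := ∀ (queries : List (List String)), Dom_contacts queries → Pre_contacts queries → Spec_contacts queries (contacts queries)

-- ===== LEMMAS AND PROOFS =====

-- one insert step of A's inner loop adds 1 exactly at the key it touches
lemma contactsStep_getD (w : String) (d : PySem.Dict String Int) (i : Int) (p : String) :
    (contactsStep w d i).getD p 0
      = d.getD p 0 + (if p = PySem.Str.slice w none (some i) then 1 else 0) := by
  by_cases hc : d.contains (PySem.Str.slice w none (some i)) = true <;>
    simp only [contactsStep, hc, if_true, Bool.false_eq_true, if_false,
      PySem.Dict.getD_insert] <;>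
    by_cases hp : p = PySem.Str.slice w none (some i)
  · rw [if_pos hp, if_pos hp, hp]
  · rw [if_neg hp, if_neg hp]; ring
  · rw [if_pos hp, if_pos hp, hp,
      PySem.Dict.getD_of_not_contains _ _ (by simpa using hc)]; ring
  · rw [if_neg hp, if_neg hp]; ring

-- A's inner fold over any index list counts how often the touched prefix equals p
lemma foldl_contactsStep_getD (w : String) (l : List Int) (p : String) :
    ∀ d : PySem.Dict String Int,
      (l.foldl (contactsStep w) d).getD p 0
        = d.getD p 0 + ((l.countP (fun i => decide (p = PySem.Str.slice w none (some i)))) : Int) := by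
  induction l with
  | nil => intro d; simp
  | cons i l ih =>
      intro d
      simp only [List.foldl_cons, List.countP_cons, ih, contactsStep_getD]
      by_cases hp : p = PySem.Str.slice w none (some i) <;> simp [hp] <;> push_cast <;> ring

-- a nonempty list is the (k+1)-prefix of cs for exactly one k < cs.length, namely when it IS a prefix
lemma countP_range_take (cs ps : List Char) (hps : ps ≠ []) :
    (List.range cs.length).countP (fun k => decide (ps = cs.take (k + 1)))
      = if ps <+: cs then 1 else 0 := by
  have hL : 1 ≤ ps.length := by
    cases ps with
    | nil => exact absurd rfl hps
    | cons a l => simp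
  by_cases hpre : ps <+: cs
  · have hLle : ps.length ≤ cs.length := hpre.length_le
    rw [if_pos hpre]
    have hcongr : ∀ k ∈ List.range cs.length,
        ((fun k => decide (ps = cs.take (k + 1))) k = true ↔ (fun k => k == ps.length - 1) k = true) := by
      intro k hk
      rw [List.mem_range] at hk
      simp only [decide_eq_true_eq, beq_iff_eq]
      constructor
      · intro he
        have : ps.length = min (k + 1) cs.length := by rw [he, List.length_take]
        omega
      · intro he
        have hk1 : k + 1 = ps.length := by omega
        rw [hk1, ← List.prefix_iff_eq_take.mp hpre]
    rw [List.countP_congr hcongr]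
    exact List.count_eq_one_of_mem List.nodup_range (by rw [List.mem_range]; omega)
  · rw [if_neg hpre]
    apply List.countP_eq_zero.mpr
    intro k hk
    simp only [decide_eq_true_eq]
    intro he
    exact hpre (he ▸ List.take_prefix _ _)

-- the index range of A's inner loop touches the prefix p exactly once iff w starts with p
lemma countP_pyRange_slice (w p : String) (hp : p ≠ "") :
    (PySem.List.pyRange 1 (PySem.Str.len w + 1) 1).countP
        (fun i => decide (p = PySem.Str.slice w none (some i)))
      = if PySem.Str.startswith w p = true then 1 else 0 := by
  have hps : p.toList ≠ [] := by
    intro h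
    exact hp (String.toList_inj.mp (by simpa using h))
  have hn : ((PySem.Str.len w + 1 - 1)).toNat = w.toList.length := by
    simp [PySem.Str.len_eq]
  rw [PySem.List.pyRange_one, List.countP_map, hn]
  have hslice : ∀ k : Nat, (PySem.Str.slice w none (some (1 + (k : Int)))).toList
      = w.toList.take (k + 1) := by
    intro k
    rw [PySem.Str.toList_slice, PySem.Chars.slice_eq_listSlice,
      PySem.List.slice_to w.toList (show (0:Int) ≤ 1 + (k:Int) by omega)]
    congr 1
    omega
  have hcongr : ∀ k ∈ List.range w.toList.length,
      (((fun i => decide (p = PySem.Str.slice w none (some i))) ∘ (fun (k : Nat) => 1 + (k : Int))) k = true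
        ↔ (fun k => decide (p.toList = w.toList.take (k + 1))) k = true) := by
    intro k _
    simp only [Function.comp, decide_eq_true_eq]
    rw [← String.toList_inj, hslice k]
  rw [List.countP_congr hcongr, countP_range_take _ _ hps]
  have hsw : PySem.Str.startswith w p = true ↔ p.toList <+: w.toList := by
    rw [← PySem.Chars.startswith_iff]; simp
  by_cases h : p.toList <+: w.toList
  · rw [if_pos h, if_pos (hsw.mpr h)]
  · rw [if_neg h, if_neg (fun hh => h (hsw.mp hh))]

-- net effect of one whole 'add' on the count stored at a nonempty key p
lemma contactsAdd_getD (w p : String) (d : PySem.Dict String Int) (hp : p ≠ "") :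
    (contactsAdd w d).getD p 0
      = d.getD p 0 + (if PySem.Str.startswith w p = true then 1 else 0) := by
  unfold contactsAdd
  rw [foldl_contactsStep_getD, countP_pyRange_slice w p hp]
  by_cases h : PySem.Str.startswith w p = true <;> simp [h]

-- main invariant: A's dictionary agrees at every nonempty key with B's name list, so the folds emit the same results
lemma contacts_loop (qs : List (List String)) :
    ∀ (d : PySem.Dict String Int) (names : List String) (res : List Int),
      (∀ q ∈ qs, 2 ≤ q.length ∧
        (PySem.List.pyGetD q 0 "" = "add" ∨ PySem.List.pyGetD q 1 "" ≠ "")) →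
      (∀ p : String, p ≠ "" →
        d.getD p 0 = ((names.countP (fun w => PySem.Str.startswith w p)) : Int)) →
      (qs.foldl contactsStepA (d, res)).2 = (qs.foldl contactsStepB (names, res)).2 := by
  induction qs with
  | nil => intro d names res _ _; rfl
  | cons q qs ih =>
      intro d names res hpre hinv
      have hq := hpre q List.mem_cons_self
      have hpre' : ∀ q' ∈ qs, 2 ≤ q'.length ∧
          (PySem.List.pyGetD q' 0 "" = "add" ∨ PySem.List.pyGetD q' 1 "" ≠ "") :=
        fun q' hq' => hpre q' (List.mem_cons_of_mem q hq')
      simp only [List.foldl_cons]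
      by_cases hadd : PySem.List.pyGetD q 0 "" = "add"
      · rw [show contactsStepA (d, res) q
              = (contactsAdd (PySem.List.pyGetD q 1 "") d, res) from by
            simp [contactsStepA, hadd],
          show contactsStepB (names, res) q
              = (names ++ [PySem.List.pyGetD q 1 ""], res) from by
            simp [contactsStepB, hadd]]
        apply ih _ _ _ hpre'
        intro p hpne
        rw [contactsAdd_getD _ _ _ hpne, hinv p hpne, List.countP_append]
        by_cases hsw : PySem.Str.startswith (PySem.List.pyGetD q 1 "") p = true <;>
          simp [hsw] <;> push_cast <;> ring
      · have hpne : PySem.List.pyGetD q 1 "" ≠ "" := hq.2.resolve_left hadd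
        have hval : (if d.contains (PySem.List.pyGetD q 1 "") then
              d.getD (PySem.List.pyGetD q 1 "") 0 else 0)
            = ((names.countP (fun w =>
                PySem.Str.startswith w (PySem.List.pyGetD q 1 ""))) : Int) := by
          by_cases hc : d.contains (PySem.List.pyGetD q 1 "") = true
          · rw [if_pos hc]; exact hinv _ hpne
          · rw [if_neg hc, ← hinv _ hpne,
              PySem.Dict.getD_of_not_contains _ _ (by simpa using hc)]
        rw [show contactsStepA (d, res) q
              = (d, res ++ [((names.countP (fun w =>
                  PySem.Str.startswith w (PySem.List.pyGetD q 1 "")) : Nat) : Int)]) from by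
            simp only [contactsStepA, if_neg hadd, hval],
          show contactsStepB (names, res) q
              = (names, res ++ [((names.countP (fun w =>
                  PySem.Str.startswith w (PySem.List.pyGetD q 1 "")) : Nat) : Int)]) from by
            simp only [contactsStepB, if_neg hadd]]
        exact ih _ _ _ hpre' hinv

-- ===== VERDICT (by name: the statement is the Claim_ definition above) =====
theorem contacts_spec : Claim_equal_contacts := by
  intro queries _ hpre
  unfold Spec_contacts contacts contacts_alt
  apply contacts_loop queries PySem.Dict.empty [] [] hpre
  intro p _
  simp [PySem.Dict.getD_empty]
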